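-- pv_equiv track=rewrite | github.com/dhanrajsahoo0007/DATA-STRUCTURE-ALGORITHM | 08. Heap/03. Story Based/15. AWS Server Queue Simulation.py | simulateQueue
-- ===== SOURCE A (Python) =====
-- from typing import List
--
-- def simulateQueue(wait: List[int]) -> List[int]:
--     n = len(wait)
--     result = [n]  # Initial queue size
--     time = 0
--
--     # Create a list of (expiration_time, index) pairs
--     expirations = [(wait[i], i) for i in range(n)]
--     expirations.sort()  # Sort by expiration time
--
--     next_to_expire = 0
--     queue_size = n
--
--     while queue_size > 0:
--         time += 1
--         queue_size -= 1  # Process the front request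
--
--         # Remove expired requests
--         while next_to_expire < n and expirations[next_to_expire][0] <= time:
--             if expirations[next_to_expire][1] > time - 1:
--                 queue_size = max(0, queue_size - 1)
--             next_to_expire += 1
--
--         if queue_size > 0:
--             result.append(queue_size)
--         else:
--             result.append(0)
--             break
--
--     return result
-- ===== SOURCE B (Python) =====
-- def simulateQueue(wait):
--     # Bucket the contributing expirations by the time they fire, then run
--     # one arithmetic draining loop (no sort, no two-pointer scan).
--     times = [max(w, 1) for i, w in enumerate(wait) if i >= max(w, 1)]
--     dec = {}
--     for t in times:
--         dec[t] = dec.get(t, 0) + 1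
--     queue_size = len(wait)
--     result = [queue_size]
--     time = 0
--     while queue_size > 0:
--         time += 1
--         queue_size = max(0, queue_size - 1 - dec.get(time, 0))
--         result.append(queue_size)
--     return result
-- ===== Notes on version B (the rewrite author's own statement) =====
-- stated objective: faster
-- what changed: Replaces the sort and the two-pointer expiration scan by a one-pass bucket count dec[t] of contributing expirations per firing time t=max(w,1), then a single arithmetic draining loop that subtracts 1+dec[time] per step.
import Mathlib
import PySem

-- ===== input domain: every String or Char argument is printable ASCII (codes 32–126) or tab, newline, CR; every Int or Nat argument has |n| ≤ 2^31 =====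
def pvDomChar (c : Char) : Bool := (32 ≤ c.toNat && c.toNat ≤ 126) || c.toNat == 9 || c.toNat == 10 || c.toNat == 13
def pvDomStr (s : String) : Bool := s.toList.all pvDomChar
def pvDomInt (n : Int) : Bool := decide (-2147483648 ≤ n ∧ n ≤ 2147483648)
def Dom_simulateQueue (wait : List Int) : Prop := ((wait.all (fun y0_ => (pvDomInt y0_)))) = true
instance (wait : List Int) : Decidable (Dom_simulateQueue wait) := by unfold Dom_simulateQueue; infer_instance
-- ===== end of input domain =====

-- B replaces A's sort + two-pointer expiration scan by a one-pass bucket count of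
-- contributing expirations per firing time and a single arithmetic draining loop (objective: faster).

-- ===== PORT A =====
-- inner while loop: 'while next_to_expire < n and expirations[next_to_expire][0] <= time: …',
-- transcribed structurally over the remaining suffix of the sorted expiration list
def innerA : List (Int × Int) → Int → Int → List (Int × Int) × Int
  | [], _, qs => ([], qs)
  | (w, i) :: rest, time, qs =>
    if w ≤ time then
      innerA rest time (if time - 1 < i then max 0 (qs - 1) else qs)
    else ((w, i) :: rest, qs)

-- termination fact the outer loop's recursion needs: the inner loop never increases queue_size
theorem innerA_le (rem : List (Int × Int)) (time : Int) :
    ∀ qs : Int, 0 ≤ qs → (innerA rem time qs).2 ≤ qs := by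
  induction rem with
  | nil => intro qs _; simp [innerA]
  | cons p rest ih =>
    intro qs hqs
    obtain ⟨w, i⟩ := p
    simp only [innerA]
    split
    · split
      · have := ih (max 0 (qs - 1)) (by omega); omega
      · exact ih qs hqs
    · simp

-- outer while loop of A
def outerA (rem : List (Int × Int)) (time qs : Int) (result : List Int) : List Int :=
  if h : 0 < qs then
    let p := innerA rem (time + 1) (qs - 1)
    if 0 < p.2 then outerA p.1 (time + 1) p.2 (result ++ [p.2])
    else result ++ [0]
  else result
termination_by qs.toNat
decreasing_by
  have := innerA_le rem (time + 1) (qs - 1) (by omega)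
  omega

def simulateQueue (wait : List Int) : List Int :=
  let n : Int := wait.length
  let expirations :=
    PySem.List.sorted2
      ((PySem.List.pyRange 0 n 1).map (fun i => (PySem.List.pyGetD wait i 0, i)))
      (fun p => p.1) (fun p => p.2) false
  outerA expirations 0 n [n]

-- ===== PORT B =====
-- fact the draining loop's recursion needs: every bucket count is nonnegative
theorem decNonneg (times : List Int) (t : Int) :
    0 ≤ (times.foldl (fun d x => d.insert x (d.getD x 0 + 1)) (PySem.Dict.empty : PySem.Dict Int Int)).getD t 0 := by
  rw [PySem.Dict.getD_foldl_insert_add_one]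
  simp [PySem.Dict.getD_empty]

-- B's 'while queue_size > 0' draining loop (hdec is only used for termination)
def altLoop (dec : PySem.Dict Int Int) (hdec : ∀ t, 0 ≤ dec.getD t 0)
    (time qs : Int) (result : List Int) : List Int :=
  if _h : 0 < qs then
    altLoop dec hdec (time + 1) (max 0 (qs - 1 - dec.getD (time + 1) 0))
      (result ++ [max 0 (qs - 1 - dec.getD (time + 1) 0)])
  else result
termination_by qs.toNat
decreasing_by
  have := hdec (time + 1)
  omega

def simulateQueue_alt (wait : List Int) : List Int :=
  let times := (PySem.List.enumerate wait).foldl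
    (fun acc p => if max p.2 1 ≤ p.1 then acc ++ [max p.2 1] else acc) []
  let dec := times.foldl (fun d x => d.insert x (d.getD x 0 + 1)) PySem.Dict.empty
  altLoop dec (decNonneg times) 0 wait.length [wait.length]

-- ===== PRECONDITION & SPEC =====
def Spec_simulateQueue (wait : List Int) (out : List Int) : Prop := out = simulateQueue_alt wait
instance (wait : List Int) (out : List Int) : Decidable (Spec_simulateQueue wait out) := by unfold Spec_simulateQueue; infer_instance

-- ===== CLAIM (what is proved, stated in full; the proofs are below) =====
def Claim_equal_simulateQueue : Prop := ∀ (wait : List Int), Dom_simulateQueue wait → Spec_simulateQueue wait (simulateQueue wait)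

-- ===== LEMMAS AND PROOFS =====

theorem pairwise_insertBy {α : Type} (before : α → α → Bool) (R : α → α → Prop)
    (htrans : ∀ a b c, R a b → R b c → R a c)
    (h1 : ∀ a b, before a b = true → R a b) (h2 : ∀ a b, before a b = false → R b a)
    (x : α) (ys : List α) (hys : ys.Pairwise R) :
    (PySem.List.insertBy before x ys).Pairwise R := by
  induction ys with
  | nil => simp [PySem.List.insertBy]
  | cons y ys ih =>
    rw [List.pairwise_cons] at hys
    simp only [PySem.List.insertBy]
    split
    · rename_i hb
      refine List.Pairwise.cons ?_ (List.Pairwise.cons hys.1 hys.2)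
      intro z hz
      rcases List.mem_cons.1 hz with rfl | hz
      · exact h1 _ _ hb
      · exact htrans _ _ _ (h1 _ _ hb) (hys.1 z hz)
    · rename_i hb
      refine List.Pairwise.cons ?_ (ih hys.2)
      intro z hz
      rcases (PySem.List.mem_insertBy _ _ _ _).1 hz with rfl | hz
      · exact h2 _ _ (Bool.not_eq_true _ ▸ hb)
      · exact hys.1 z hz

theorem pairwise_foldl_insertBy {α : Type} (before : α → α → Bool) (R : α → α → Prop)
    (htrans : ∀ a b c, R a b → R b c → R a c)
    (h1 : ∀ a b, before a b = true → R a b) (h2 : ∀ a b, before a b = false → R b a)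
    (xs : List α) (acc : List α) (hacc : acc.Pairwise R) :
    (xs.foldl (fun acc x => PySem.List.insertBy before x acc) acc).Pairwise R := by
  induction xs generalizing acc with
  | nil => exact hacc
  | cons x xs ih =>
    exact ih _ (pairwise_insertBy before R htrans h1 h2 x acc hacc)

theorem innerA_spec (time : Int) (rem : List (Int × Int))
    (hs : rem.Pairwise (fun a b => a.1 ≤ b.1)) :
    ∀ qs : Int, 0 ≤ qs →
    innerA rem time qs =
      (rem.filter (fun p => decide (time < p.1)),
       max 0 (qs - (rem.countP (fun p => decide (p.1 ≤ time ∧ time - 1 < p.2)) : Int))) := by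
  induction rem with
  | nil =>
    intro qs hqs
    simp [innerA]
    omega
  | cons p rest ih =>
    intro qs hqs
    obtain ⟨w, i⟩ := p
    rw [List.pairwise_cons] at hs
    simp only [innerA, List.filter_cons, List.countP_cons]
    by_cases hw : w ≤ time
    · rw [if_pos hw]
      by_cases hi : time - 1 < i
      · rw [if_pos hi, ih hs.2 _ (by omega)]
        have hc1 : (decide (time < (w, i).1)) = false := by simp; omega
        have hc2 : (decide ((w, i).1 ≤ time ∧ time - 1 < (w, i).2)) = true := by simp; omega
        rw [hc1, hc2]
        simp only [if_neg Bool.false_ne_true]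
        refine Prod.ext rfl ?_
        push_cast
        omega
      · rw [if_neg hi, ih hs.2 _ hqs]
        have hc1 : (decide (time < (w, i).1)) = false := by simp; omega
        have hc2 : (decide ((w, i).1 ≤ time ∧ time - 1 < (w, i).2)) = false := by simp; omega
        rw [hc1, hc2]
        simp
    · rw [if_neg hw]
      have hc1 : (decide (time < (w, i).1)) = true := by simp; omega
      have hc2 : (decide ((w, i).1 ≤ time ∧ time - 1 < (w, i).2)) = false := by simp; omega
      rw [hc1, hc2]
      simp only [if_neg Bool.false_ne_true]
      have hrest : rest.filter (fun p => decide (time < p.1)) = rest := by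
        refine List.filter_eq_self.2 fun a ha => ?_
        have := hs.1 a ha
        simp only [decide_eq_true_eq]
        omega
      have hcnt : rest.countP (fun p => decide (p.1 ≤ time ∧ time - 1 < p.2)) = 0 := by
        refine List.countP_eq_zero.2 fun a ha => ?_
        have := hs.1 a ha
        simp only [decide_eq_true_eq, not_and]
        omega
      rw [hrest, hcnt]
      refine Prod.ext rfl ?_
      simp
      omega

theorem loop_eq (S : List (Int × Int)) (hs : S.Pairwise (fun a b => a.1 ≤ b.1))
    (dec : PySem.Dict Int Int) (hdec : ∀ t, 0 ≤ dec.getD t 0)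
    (hd : ∀ t, dec.getD t 0 = (S.countP (fun p => decide (max p.1 1 = t ∧ t ≤ p.2)) : Int))
    (n : Nat) (qs time : Int) (hle : qs.toNat ≤ n) (ht : 0 ≤ time) (res : List Int) :
    outerA (S.filter (fun p => decide (time < max p.1 1))) time qs res
      = altLoop dec hdec time qs res := by
  induction n generalizing qs time res with
  | zero =>
    rw [outerA, altLoop, dif_neg (by omega : ¬ 0 < qs), dif_neg (by omega : ¬ 0 < qs)]
  | succ n ih =>
    by_cases hq : 0 < qs
    · have hpw : (S.filter (fun p => decide (time < max p.1 1))).Pairwise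
          (fun a b : Int × Int => a.1 ≤ b.1) := hs.sublist List.filter_sublist
      have hspec := innerA_spec (time + 1) _ hpw (qs - 1) (by omega)
      -- the dict count at time+1 equals the inner loop's contributing count
      have hC : ((S.filter (fun p => decide (time < max p.1 1))).countP
            (fun p => decide (p.1 ≤ time + 1 ∧ time + 1 - 1 < p.2)) : Int)
          = dec.getD (time + 1) 0 := by
        rw [hd (time + 1), List.countP_filter]
        congr 1
        refine List.countP_congr fun a _ => ?_
        rw [Bool.eq_iff_iff]
        simp only [Bool.and_eq_true, decide_eq_true_eq, iff_true]
        omega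
      have hF : (S.filter (fun p => decide (time < max p.1 1))).filter
            (fun p => decide (time + 1 < p.1))
          = S.filter (fun p => decide (time + 1 < max p.1 1)) := by
        rw [List.filter_filter]
        refine List.filter_congr fun a _ => ?_
        rw [Bool.eq_iff_iff]
        simp only [Bool.and_eq_true, decide_eq_true_eq]
        omega
      rw [outerA, dif_pos hq]
      simp only [hspec, hF, hC]
      have hd1 := hdec (time + 1)
      rw [altLoop, dif_pos hq]
      by_cases hq' : 0 < max 0 (qs - 1 - dec.getD (time + 1) 0)
      · rw [if_pos hq']
        exact ih _ _ (by omega) (by omega) _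
      · rw [if_neg hq']
        have h0 : max 0 (qs - 1 - dec.getD (time + 1) 0) = 0 := by omega
        rw [h0, altLoop, dif_neg (by omega : ¬ (0:Int) < 0)]
    · rw [outerA, altLoop, dif_neg hq, dif_neg hq]

theorem count_foldl_append_if (t : Int) :
    ∀ (l : List (Int × Int)) (acc : List Int),
    (l.foldl (fun acc p => if max p.2 1 ≤ p.1 then acc ++ [max p.2 1] else acc) acc).count t
      = acc.count t + l.countP (fun q => decide (max q.2 1 = t ∧ t ≤ q.1)) := by
  intro l
  induction l with
  | nil => intro acc; simp
  | cons q l ih =>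
    intro acc
    simp only [List.foldl_cons, List.countP_cons]
    by_cases hq : max q.2 1 ≤ q.1
    · rw [if_pos hq, ih]
      rw [List.count_append]
      by_cases he : max q.2 1 = t
      · have : (decide (max q.2 1 = t ∧ t ≤ q.1)) = true := by simp; omega
        rw [this]
        simp [he]
        omega
      · have : (decide (max q.2 1 = t ∧ t ≤ q.1)) = false := by simp; omega
        rw [this]
        simp [List.count_singleton]
        omega
    · rw [if_neg hq, ih]
      have : (decide (max q.2 1 = t ∧ t ≤ q.1)) = false := by simp; omega
      rw [this]
      simp

-- ===== VERDICT (by name: the statement is the Claim_ definition above) =====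
theorem simulateQueue_spec : Claim_equal_simulateQueue := by
  intro wait _
  unfold Spec_simulateQueue
  show simulateQueue wait = simulateQueue_alt wait
  simp only [simulateQueue, simulateQueue_alt]
  have hEnum : (PySem.List.pyRange 0 (wait.length : Int) 1).map
        (fun i => (PySem.List.pyGetD wait i 0, i))
      = (PySem.List.enumerate wait).map (fun q => (q.2, q.1)) := by
    rw [PySem.List.enumerate_eq_map_pyRange wait 0, List.map_map]
    simp [Function.comp]
  rw [hEnum]
  set E : List (Int × Int) := (PySem.List.enumerate wait).map (fun q => (q.2, q.1)) with hE
  set S : List (Int × Int) := PySem.List.sorted2 E (fun p => p.1) (fun p => p.2) false with hS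
  set times : List Int := (PySem.List.enumerate wait).foldl
    (fun acc p => if max p.2 1 ≤ p.1 then acc ++ [max p.2 1] else acc) [] with htimes
  have hperm : S.Perm E := PySem.List.sorted2_perm E _ _ false
  have hs : S.Pairwise (fun a b : Int × Int => a.1 ≤ b.1) := by
    rw [hS]
    simp only [PySem.List.sorted2]
    refine pairwise_foldl_insertBy _ (fun a b : Int × Int => a.1 ≤ b.1)
      (fun a b c h1 h2 => le_trans h1 h2) ?_ ?_ E [] List.Pairwise.nil
    · intro a b h
      rw [if_neg Bool.false_ne_true] at h
      simp only [Bool.or_eq_true, Bool.and_eq_true, Bool.not_eq_eq_eq_not,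
        Bool.not_true, decide_eq_true_eq, decide_eq_false_iff_not] at h
      omega
    · intro a b h
      rw [if_neg Bool.false_ne_true] at h
      simp only [Bool.or_eq_false_iff, Bool.and_eq_false_iff, Bool.not_eq_eq_eq_not,
        Bool.not_false, decide_eq_false_iff_not, decide_eq_true_eq] at h
      omega
  have hdec := decNonneg times
  have hd : ∀ t : Int, (times.foldl (fun d x => d.insert x (d.getD x 0 + 1))
        (PySem.Dict.empty : PySem.Dict Int Int)).getD t 0
      = (S.countP (fun p => decide (max p.1 1 = t ∧ t ≤ p.2)) : Int) := by
    intro t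
    rw [PySem.Dict.getD_foldl_insert_add_one, PySem.Dict.getD_empty, zero_add]
    rw [hperm.countP_eq, hE, List.countP_map]
    rw [htimes, count_foldl_append_if t _ [], List.count_nil, Nat.zero_add]
    congr 1
  have hfilter0 : S.filter (fun p => decide ((0:Int) < max p.1 1)) = S := by
    refine List.filter_eq_self.2 fun a _ => ?_
    simp only [decide_eq_true_eq]
    omega
  have hmain := loop_eq S hs _ hdec hd wait.length (wait.length : Int) 0
    (by omega) (by omega) [(wait.length : Int)]
  rw [hfilter0] at hmain
  exact hmain
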